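-- pv_equiv track=rewrite | github.com/Aymen-Mohammednur/Competitive-Programming | 0005-longest-palindromic-substring/0005-longest-palindromic-substring.py | palindromeSize
-- ===== SOURCE A (Python) =====
-- def palindromeSize(s, l, r):
--     longest = [0, 0, 0]
--     while l >= 0 and r < len(s) and s[l] == s[r]:
--         if longest[0] < r - l + 1:
--             longest = [r - l + 1, l, r]
--         l -= 1
--         r += 1
--     return longest
-- ===== SOURCE B (Python) =====
-- def palindromeSize(s, l, r):
--     # Different algorithm: instead of expanding two pointers and tracking a
--     # best-so-far window, take the reversed prefix ending at l and the suffix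
--     # starting at r, count their common prefix length k, and compute the
--     # final window from l, r and k in closed form.
--     n = len(s)
--     if not (0 <= l < n and 0 <= r < n):
--         return [0, 0, 0]
--     left = s[:l + 1][::-1]
--     right = s[r:]
--     k = 0
--     for a, b in zip(left, right):
--         if a != b:
--             break
--         k += 1
--     size = r - l + 2 * k - 1
--     if k > 0 and size > 0:
--         return [size, l - k + 1, r + k - 1]
--     return [0, 0, 0]
-- ===== Notes on version B (the rewrite author's own statement) =====
-- stated objective: alternative
-- what changed: B replaces A's expand-two-pointers loop with best-so-far tracking by slicing the reversed prefix ending at l and the suffix starting at r, counting their common prefix length k, and computing the result window from l, r, k in closed form.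
-- outside the precondition, e.g. on palindromeSize('aaa', 1, -1): A returns [1, 0, 0], B returns [0, 0, 0]; on palindromeSize('a', 5, 0): A raises IndexError, B returns [0, 0, 0]
import Mathlib
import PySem

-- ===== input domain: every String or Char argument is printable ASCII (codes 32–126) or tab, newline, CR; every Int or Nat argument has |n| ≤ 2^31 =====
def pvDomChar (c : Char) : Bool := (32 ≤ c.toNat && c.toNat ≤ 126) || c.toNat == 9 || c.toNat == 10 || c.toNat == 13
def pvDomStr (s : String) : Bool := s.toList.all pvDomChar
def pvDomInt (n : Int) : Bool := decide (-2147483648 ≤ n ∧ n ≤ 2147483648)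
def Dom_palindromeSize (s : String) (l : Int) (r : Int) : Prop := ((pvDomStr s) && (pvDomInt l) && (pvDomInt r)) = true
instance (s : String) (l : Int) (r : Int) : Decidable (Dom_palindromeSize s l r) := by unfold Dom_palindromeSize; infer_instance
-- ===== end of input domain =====

-- B computes the window in closed form from the common-prefix length of the reversed
-- prefix ending at l and the suffix starting at r, instead of A's expand-and-track loop.

-- ===== PORT A =====
-- A's loop guard `l >= 0 and r < len(s) and s[l] == s[r]` (false also where Python
-- would raise IndexError; those inputs are excluded by Pre_ below).
def pvCond (s : List Char) (l r : Int) : Bool :=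
  decide (0 ≤ l) && decide (r < (s.length : Int)) &&
    (match PySem.List.pyGet? s l, PySem.List.pyGet? s r with
     | some a, some b => a == b
     | _, _ => false)

lemma pvCond_lt (s : List Char) (l r : Int) (h : pvCond s l r = true) :
    r < (s.length : Int) := by
  simp only [pvCond, Bool.and_eq_true, decide_eq_true_eq] at h
  exact h.1.2

-- A's while loop: carry `longest`, update it when the current size beats it
-- (`longest` is always a 3-element list; `longest[0]` is its head).
def pvLoopA (s : List Char) (l r : Int) (longest : List Int) : List Int :=
  if h : pvCond s l r = true then
    pvLoopA s (l - 1) (r + 1)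
      (if longest.headD 0 < r - l + 1 then [r - l + 1, l, r] else longest)
  else longest
termination_by ((s.length : Int) - r).toNat
decreasing_by
  have := pvCond_lt s l r h
  omega

def palindromeSize (s : String) (l : Int) (r : Int) : List Int :=
  pvLoopA s.toList l r [0, 0, 0]

-- ===== PORT B =====
-- Source B's zip loop: count matching leading pairs, k is the running counter.
def pvCommon : List Char → List Char → Nat → Nat
  | a :: l, b :: r, k => if a == b then pvCommon l r (k + 1) else k
  | _, _, k => k

def palindromeSize_alt (s : String) (l : Int) (r : Int) : List Int :=
  let cs := s.toList
  let n : Int := cs.length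
  if 0 ≤ l ∧ l < n ∧ 0 ≤ r ∧ r < n then
    let left := (PySem.List.slice cs none (some (l + 1))).reverse  -- s[:l+1][::-1]
    let right := PySem.List.slice cs (some r) none                 -- s[r:]
    let k : Int := pvCommon left right 0
    let size := r - l + 2 * k - 1
    if 0 < k ∧ 0 < size then [size, l - k + 1, r + k - 1] else [0, 0, 0]
  else [0, 0, 0]

-- ===== PRECONDITION & SPEC =====
-- Pre_ excludes the calls with 0 ≤ l, r < len(s) where A indexes out of the valid
-- range: for len(s) ≤ l or r < -len(s) A raises IndexError, and for
-- -len(s) ≤ r < 0 (an out-of-range window bound no caller of this expand-around-center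
-- helper passes) A's comparison reads s[r] through Python's negative-index wraparound,
-- an artefact of that indexing; B returns [0, 0, 0] on all of them.
def Pre_palindromeSize (s : String) (l : Int) (r : Int) : Prop :=
  ¬ (0 ≤ l ∧ r < (s.length : Int) ∧ ((s.length : Int) ≤ l ∨ r < 0))
instance (s : String) (l : Int) (r : Int) : Decidable (Pre_palindromeSize s l r) := by
  unfold Pre_palindromeSize; infer_instance

def pvWitness_palindromeSize : String × Int × Int := ("aba", 1, 1)

def Spec_palindromeSize (s : String) (l : Int) (r : Int) (out : List Int) : Prop := out = palindromeSize_alt s l r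
instance (s : String) (l : Int) (r : Int) (out : List Int) : Decidable (Spec_palindromeSize s l r out) := by unfold Spec_palindromeSize; infer_instance

-- ===== CLAIM (what is proved, stated in full; the proofs are below) =====
def Claim_equal_palindromeSize : Prop := ∀ (s : String) (l : Int) (r : Int), Dom_palindromeSize s l r → Pre_palindromeSize s l r → Spec_palindromeSize s l r (palindromeSize s l r)
-- ===== LEMMAS AND PROOFS =====

-- pvCommon with a general accumulator.
lemma pvCommon_acc : ∀ (a b : List Char) (k : Nat), pvCommon a b k = k + pvCommon a b 0 := by
  intro a
  induction a with
  | nil => intro b k; cases b <;> simp [pvCommon]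
  | cons x xs ih =>
    intro b k
    cases b with
    | nil => simp [pvCommon]
    | cons y ys =>
      by_cases h : x == y
      · simp only [pvCommon, h, if_pos]
        rw [ih ys (k + 1), ih ys 1]
        omega
      · simp [pvCommon, h]

-- the common-prefix length B computes, as a function of the current bounds
def pvKf (cs : List Char) (l r : Int) : Nat :=
  pvCommon ((cs.take (l + 1).toNat).reverse) (cs.drop r.toNat) 0

lemma pvKf_step (cs : List Char) (l r : Int) (hl0 : 0 ≤ l) (hln : l < cs.length)
    (hr0 : 0 ≤ r) (hrn : r < cs.length) :
    pvKf cs l r =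
      (if cs[l.toNat]'(by omega) == cs[r.toNat]'(by omega)
       then pvKf cs (l - 1) (r + 1) + 1 else 0) := by
  have h1 : (l + 1).toNat = l.toNat + 1 := by omega
  have h2 : l.toNat < cs.length := by omega
  have h3 : r.toNat < cs.length := by omega
  have htake : (cs.take (l + 1).toNat).reverse
      = cs[l.toNat]'h2 :: (cs.take l.toNat).reverse := by
    rw [h1, List.take_add_one]
    simp [List.getElem?_eq_getElem h2]
  have hdrop : cs.drop r.toNat = cs[r.toNat]'h3 :: cs.drop (r.toNat + 1) :=
    List.drop_eq_getElem_cons h3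
  have h4 : ((l - 1) + 1).toNat = l.toNat := by omega
  have h5 : (r + 1).toNat = r.toNat + 1 := by omega
  unfold pvKf
  rw [htake, hdrop, h4, h5]
  by_cases h : cs[l.toNat]'h2 == cs[r.toNat]'h3
  · simp only [pvCommon, h, if_pos]
    rw [pvCommon_acc]
    simp [Nat.add_comm]
  · simp [pvCommon, h]

lemma pvCond_char (cs : List Char) (l r : Int) (hl0 : 0 ≤ l) (hln : l < cs.length)
    (hr0 : 0 ≤ r) (hrn : r < cs.length) :
    pvCond cs l r = (cs[l.toNat]'(by omega) == cs[r.toNat]'(by omega)) := by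
  have hgl : PySem.List.pyGet? cs l = some (cs[l.toNat]'(by omega)) :=
    PySem.List.pyGet?_eq_some_getElem cs hl0 hln
  have hgr : PySem.List.pyGet? cs r = some (cs[r.toNat]'(by omega)) :=
    PySem.List.pyGet?_eq_some_getElem cs hr0 hrn
  simp [pvCond, hgl, hgr, hl0, hrn]

lemma pvKf_zero_left (cs : List Char) (l r : Int) (hl : l < 0) : pvKf cs l r = 0 := by
  have : (l + 1).toNat = 0 := by omega
  simp [pvKf, this, pvCommon]

lemma pvKf_zero_right (cs : List Char) (l r : Int) (hr : (cs.length : Int) ≤ r) :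
    pvKf cs l r = 0 := by
  have : cs.length ≤ r.toNat := by omega
  rw [pvKf, List.drop_eq_nil_of_le this]
  cases ((cs.take (l + 1).toNat).reverse) <;> simp [pvCommon]

-- Main loop invariant: from any state reachable by A's loop, the loop's result
-- is B's closed-form window when it is positive, else the carried accumulator.
lemma pvLoopA_eq : ∀ (fuel : Nat) (cs : List Char) (l r : Int) (acc : List Int),
    ((cs.length : Int) - r).toNat ≤ fuel → l < cs.length → 0 ≤ r →
    (acc = [0, 0, 0] ∨ (0 < r - l - 1 ∧ acc = [r - l - 1, l + 1, r - 1])) →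
    pvLoopA cs l r acc =
      (if 0 < (pvKf cs l r : Int) ∧ 0 < r - l + 2 * (pvKf cs l r : Int) - 1
       then [r - l + 2 * (pvKf cs l r : Int) - 1, l - (pvKf cs l r : Int) + 1,
             r + (pvKf cs l r : Int) - 1]
       else acc) := by
  intro fuel
  induction fuel with
  | zero =>
    intro cs l r acc hfu hln hr0 hinv
    rw [pvLoopA]
    have hrn : (cs.length : Int) ≤ r := by omega
    have hc : ¬ pvCond cs l r = true := fun h => by have := pvCond_lt cs l r h; omega
    rw [pvKf_zero_right cs l r hrn]
    simp [hc]
  | succ fuel ih =>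
    intro cs l r acc hfu hln hr0 hinv
    rw [pvLoopA]
    by_cases hc : pvCond cs l r = true
    · -- guard true: l, r in range and chars match
      have hl0 : 0 ≤ l := by
        simp only [pvCond, Bool.and_eq_true, decide_eq_true_eq] at hc
        exact hc.1.1
      have hrn : r < (cs.length : Int) := pvCond_lt cs l r hc
      have hchar : cs[l.toNat]'(by omega) == cs[r.toNat]'(by omega) := by
        rw [pvCond_char cs l r hl0 hln hr0 hrn] at hc
        exact hc
      have hk : pvKf cs l r = pvKf cs (l - 1) (r + 1) + 1 := by
        rw [pvKf_step cs l r hl0 hln hr0 hrn, if_pos hchar]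
      simp only [hc, dif_pos]
      set acc' := (if acc.headD 0 < r - l + 1 then [r - l + 1, l, r] else acc) with hacc'
      have hhead : acc.headD 0 = 0 ∨ (0 < r - l - 1 ∧ acc.headD 0 = r - l - 1) := by
        rcases hinv with h | ⟨h1, h2⟩
        · left; rw [h]; rfl
        · right; exact ⟨h1, by rw [h2]; rfl⟩
      have hinv' : acc' = [0, 0, 0] ∨
          (0 < (r + 1) - (l - 1) - 1 ∧ acc' = [(r + 1) - (l - 1) - 1, (l - 1) + 1, (r + 1) - 1]) := by
        by_cases hpos : 0 < r - l + 1
        · right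
          refine ⟨by omega, ?_⟩
          have hup : acc.headD 0 < r - l + 1 := by
            rcases hhead with h | ⟨h1, h2⟩ <;> omega
          rw [hacc', if_pos hup]
          simp only [List.cons.injEq, and_true]
          omega
        · left
          have hnup : ¬ acc.headD 0 < r - l + 1 := by
            rcases hhead with h | ⟨h1, h2⟩ <;> omega
          rw [hacc', if_neg hnup]
          rcases hinv with h | ⟨h1, _⟩
          · exact h
          · omega
      have hrec := ih cs (l - 1) (r + 1) acc' (by omega) (by omega) (by omega) hinv'
      rw [hrec, hk]
      set k' := pvKf cs (l - 1) (r + 1) with hk'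
      push_cast
      by_cases hcase : 0 < (k' : Int) ∧ 0 < (r + 1) - (l - 1) + 2 * (k' : Int) - 1
      · rw [if_pos hcase, if_pos (by constructor <;> omega)]
        simp only [List.cons.injEq, and_true]
        omega
      · rw [if_neg hcase]
        by_cases hk0 : 0 < (k' : Int)
        · -- k' > 0 but inner size ≤ 0: no window is positive yet, acc untouched
          have hsz : ¬ 0 < (r + 1) - (l - 1) + 2 * (k' : Int) - 1 := fun h => hcase ⟨hk0, h⟩
          rw [if_neg (by omega)]
          rw [hacc', if_neg (by rcases hhead with h | ⟨h1, h2⟩ <;> omega)]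
        · -- k' = 0: outer k = 1, window is the current pair if its size is positive
          have hk'0 : (k' : Int) = 0 := by omega
          by_cases hpos : 0 < r - l + 1
          · rw [if_pos (by omega)]
            rw [hacc', if_pos (by rcases hhead with h | ⟨h1, h2⟩ <;> omega)]
            simp only [List.cons.injEq, and_true]
            omega
          · rw [if_neg (by omega)]
            rw [hacc', if_neg (by rcases hhead with h | ⟨h1, h2⟩ <;> omega)]
    · -- guard false: loop exits with acc; the closed form also yields acc
      rw [dif_neg hc]
      by_cases hl0 : 0 ≤ l
      · by_cases hrn : r < (cs.length : Int)
        · have : pvKf cs l r = 0 := by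
            rw [pvKf_step cs l r hl0 (by omega) hr0 hrn]
            rw [pvCond_char cs l r hl0 (by omega) hr0 hrn] at hc
            simp [hc]
          simp [this]
        · rw [pvKf_zero_right cs l r (by omega)]; simp
      · rw [pvKf_zero_left cs l r (by omega)]; simp

-- ===== VERDICT (by name: the statement is the Claim_ definition above) =====
theorem palindromeSize_spec : Claim_equal_palindromeSize := by
  intro s l r _ hpre
  unfold Spec_palindromeSize palindromeSize palindromeSize_alt
  unfold Pre_palindromeSize at hpre
  set cs := s.toList with hcs
  have hsl : s.length = cs.length := by simp [hcs]
  rw [hsl] at hpre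
  by_cases hmain : 0 ≤ l ∧ l < (cs.length : Int) ∧ 0 ≤ r ∧ r < (cs.length : Int)
  · obtain ⟨hl0, hln, hr0, hrn⟩ := hmain
    rw [if_pos ⟨hl0, hln, hr0, hrn⟩]
    rw [pvLoopA_eq (((cs.length : Int) - r).toNat) cs l r [0,0,0] le_rfl (by omega) hr0 (Or.inl rfl)]
    have hleft : PySem.List.slice cs none (some (l + 1)) = cs.take (l + 1).toNat :=
      PySem.List.slice_to cs (by omega)
    have hright : PySem.List.slice cs (some r) none = cs.drop r.toNat :=
      PySem.List.slice_from cs hr0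
    simp only [hleft, hright]
    rfl
  · -- outside the index range admitted by Pre_: l < 0 or r ≥ len; both give [0,0,0]
    have hng : l < 0 ∨ (cs.length : Int) ≤ r := by
      by_cases hl0 : 0 ≤ l
      · right
        by_contra hrn
        push Not at hrn
        by_cases hr0 : 0 ≤ r
        · exact hmain ⟨hl0, by by_contra h; exact hpre ⟨hl0, by omega, Or.inl (by omega)⟩, hr0, hrn⟩
        · exact hpre ⟨hl0, hrn, Or.inr (by omega)⟩
      · left; omega
    have hc : ¬ pvCond cs l r = true := by
      intro h
      simp only [pvCond, Bool.and_eq_true, decide_eq_true_eq] at h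
      rcases hng with h1 | h1
      · omega
      · have := h.1.2; omega
    rw [pvLoopA, dif_neg hc, if_neg (by rcases hng with h1 | h1 <;> omega)]
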